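-- pv_equiv track=rewrite | github.com/DutchFakeTuber/Advent_of_Code | 2015/Day 5/Day 5 - Doesn't He Have Intern-Elves For This.py | checkDouble
-- ===== SOURCE A (Python) =====
-- import operator
--
-- def checkDouble(line: str) -> bool:
--     double: list = [chars for chars in map(operator.add, line[::], line[1::])]
--     for _n, _chars in enumerate(double):
--         for n, chars in enumerate(double):
--             if _n == n:
--                 continue
--             if _chars == chars and abs(_n - n) != 1:
--                 yield chars
-- ===== SOURCE B (Python) =====
-- # Counter-based: one pass builds pair frequencies; per index, yield count = freq - self - equal neighbours.
-- def checkDouble(line: str):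
--     double = [line[i:i+2] for i in range(len(line) - 1)]
--     freq = {}
--     for p in double:
--         freq[p] = freq.get(p, 0) + 1
--     for i, v in enumerate(double):
--         c = freq[v] - 1
--         if i > 0 and double[i-1] == v:
--             c -= 1
--         if i + 1 < len(double) and double[i+1] == v:
--             c -= 1
--         for _ in range(c):
--             yield v
-- ===== Notes on version B (the rewrite author's own statement) =====
-- stated objective: alternative
-- what changed: Replaces A's quadratic all-pairs inner scan by a single pass building a pair-frequency dict, then per index yields the pair (freq - 1 - equal adjacent neighbours) times, preserving the exact yielded sequence; intended as faster (measured ~1.6-1.9x on mid sizes, below the 1.5x confirmation bar at the largest size), claimed only as alternative.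
import Mathlib
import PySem

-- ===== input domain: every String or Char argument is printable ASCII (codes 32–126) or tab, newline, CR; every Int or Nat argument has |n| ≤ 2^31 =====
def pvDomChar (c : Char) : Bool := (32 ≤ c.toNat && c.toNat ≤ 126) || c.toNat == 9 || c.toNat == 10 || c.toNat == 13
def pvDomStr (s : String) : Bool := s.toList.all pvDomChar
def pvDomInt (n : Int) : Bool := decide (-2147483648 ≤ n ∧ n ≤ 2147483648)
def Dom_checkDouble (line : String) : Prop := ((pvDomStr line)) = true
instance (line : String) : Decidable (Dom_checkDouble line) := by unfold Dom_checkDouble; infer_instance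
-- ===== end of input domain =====

-- B replaces A's quadratic all-pairs inner scan by a one-pass pair-frequency counter plus a
-- per-index adjustment for the two adjacent positions; the yielded sequence of A (a generator)
-- is ported as the List String of its yields, in order.

-- ===== PORT A =====
-- double = map(operator.add, line[::], line[1::]) zips the string with its tail char-wise
def checkDouble (line : String) : List String :=
  let cs := line.toList
  let double : List String := List.zipWith (fun a b => String.ofList [a, b]) cs (cs.drop 1)
  (PySem.List.enumerate double 0).foldl (fun acc ic =>
    (PySem.List.enumerate double 0).foldl (fun acc2 jc =>
      if ic.1 = jc.1 then acc2
      else if ic.2 = jc.2 ∧ (ic.1 - jc.1).natAbs ≠ 1 then acc2 ++ [jc.2]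
      else acc2) acc) []

-- ===== PORT B =====
def checkDouble_alt (line : String) : List String :=
  let cs := line.toList
  let double : List String := List.zipWith (fun a b => String.ofList [a, b]) cs (cs.drop 1)
  let freq : PySem.Dict String Int :=
    double.foldl (fun d p => d.insert p (d.getD p 0 + 1)) PySem.Dict.empty
  (PySem.List.enumerate double 0).foldl (fun acc iv =>
    let i := iv.1
    let v := iv.2
    let c := freq.getD v 0 - 1
    let c := if 0 < i ∧ PySem.List.pyGet? double (i-1) = some v then c - 1 else c
    let c := if i + 1 < (double.length : Int) ∧ PySem.List.pyGet? double (i+1) = some v then c - 1 else c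
    (PySem.List.pyRange 0 c 1).foldl (fun a _ => a ++ [v]) acc) []

-- ===== PRECONDITION & SPEC =====
def Spec_checkDouble (line : String) (out : List String) : Prop := out = checkDouble_alt line
instance (line : String) (out : List String) : Decidable (Spec_checkDouble line out) := by unfold Spec_checkDouble; infer_instance

-- ===== CLAIM (what is proved, stated in full; the proofs are below) =====
def Claim_equal_checkDouble : Prop := ∀ (line : String), Dom_checkDouble line → Spec_checkDouble line (checkDouble line)

-- ===== LEMMAS AND PROOFS =====
theorem countP_and_split {α : Type} (l : List α) (p q : α → Bool) :
    l.countP p = l.countP (fun x => p x && q x) + l.countP (fun x => p x && !q x) := by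
  induction l with
  | nil => simp
  | cons a t ih =>
    simp only [List.countP_cons, ih]
    cases hp : p a <;> cases hq : q a <;> simp <;> omega

theorem countP_or_disjoint {α : Type} (l : List α) (p q : α → Bool)
    (h : ∀ x ∈ l, ¬(p x = true ∧ q x = true)) :
    l.countP (fun x => p x || q x) = l.countP p + l.countP q := by
  induction l with
  | nil => simp
  | cons a t ih =>
    have ha := h a (by simp)
    simp only [List.countP_cons, ih (fun x hx => h x (by simp [hx]))]
    cases hp : p a <;> cases hq : q a <;> simp_all <;> omega

theorem countP_range_point (m t : Nat) (c : Nat → Bool) :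
    (List.range m).countP (fun j => (j == t) && c j) = if t < m ∧ c t then 1 else 0 := by
  induction m with
  | zero => simp
  | succ m ih =>
    rw [List.range_succ, List.countP_append, ih]
    simp only [List.countP_singleton]
    by_cases htm : t = m
    · subst htm; cases hc : c t <;> simp
    · have hne : ((m == t) && c m) = false := by simp [Ne.symm htm]
      simp only [hne, if_false, Bool.false_eq_true]
      have : t < m ↔ t < m + 1 := by omega
      simp [this]

theorem count_eq_countP_range {α : Type} [BEq α] [LawfulBEq α] (l : List α) (v dflt : α) :
    l.count v = (List.range l.length).countP (fun j => l.getD j dflt == v) := by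
  induction l with
  | nil => simp
  | cons a t ih =>
    rw [List.length_cons, List.range_succ_eq_map, List.countP_cons, List.countP_map]
    simp only [Function.comp_def, List.getD_cons_succ, List.getD_cons_zero, List.count_cons, ih]

-- the central counting fact: for k < n, v = d[k],
-- #{j < n | j ≠ k, d[j] = v, |k-j| ≠ 1} = count v d - 1 - [k>0 ∧ d[k-1]=v] - [k+1<n ∧ d[k+1]=v]
theorem core_count (d : List String) (k : Nat) (hk : k < d.length) :
    ((List.range d.length).countP
        (fun (j : Nat) => !((k : Int) == (j : Int)) && (d[k] == d.getD j "") && !(((k : Int) - (j : Int)).natAbs == 1)) : Int)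
      = (d.count d[k] : Int) - 1
        - (if 0 < k ∧ d.getD (k-1) "" = d[k] then 1 else 0)
        - (if k + 1 < d.length ∧ d.getD (k+1) "" = d[k] then 1 else 0) := by
  set v := d[k] with hv
  set n := d.length with hn
  have hgdk : d.getD k "" = v := by
    rw [List.getD_eq_getElem _ _ hk]
  -- split the all-equal count into good + bad
  have hsplit := countP_and_split (List.range n) (fun j => d.getD j "" == v)
      (fun j => !(j == k) && !(((k : Int) - (j : Int)).natAbs == 1))
  -- good part matches the LHS predicate
  have hgood : (List.range n).countP
      (fun j => (d.getD j "" == v) && (!(j == k) && !(((k : Int) - (j : Int)).natAbs == 1)))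
      = (List.range n).countP
      (fun (j : Nat) => !((k : Int) == (j : Int)) && (v == d.getD j "") && !(((k : Int) - (j : Int)).natAbs == 1)) := by
    apply List.countP_congr
    intro j hj
    simp only [Bool.and_eq_true, Bool.not_eq_true', beq_eq_false_iff_ne, ne_eq, beq_iff_eq,
      Nat.cast_inj]
    constructor
    · rintro ⟨h1, h2, h3⟩; exact ⟨⟨fun h => h2 h.symm, h1.symm⟩, h3⟩
    · rintro ⟨⟨h1, h2⟩, h3⟩; exact ⟨h2.symm, fun h => h1 h.symm, h3⟩
  -- bad part = three disjoint points
  have hbadeq : (List.range n).countP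
      (fun j => (d.getD j "" == v) && !(!(j == k) && !(((k : Int) - (j : Int)).natAbs == 1)))
      = (List.range n).countP
      (fun j => ((j == k) && true) || (((j == k - 1) && (decide (0 < k) && (d.getD j "" == v)))
              || ((j == k + 1) && (d.getD j "" == v)))) := by
    apply List.countP_congr
    intro j hj
    simp only [List.mem_range] at hj
    simp only [Bool.and_eq_true, Bool.or_eq_true, Bool.not_eq_true', Bool.and_eq_false_iff,
      Bool.not_eq_false', beq_iff_eq, decide_eq_true_eq, Bool.and_true]
    constructor
    · rintro ⟨hdv, hb⟩
      rcases hb with hjk | habs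
      · left; exact hjk
      · have hcl : j = k - 1 ∧ 0 < k ∨ j = k + 1 := by omega
        rcases hcl with ⟨h1, h2⟩ | h1
        · right; left; exact ⟨h1, h2, hdv⟩
        · right; right; exact ⟨h1, hdv⟩
    · rintro (hjk | ⟨h1, h2, h3⟩ | ⟨h1, h2⟩)
      · subst hjk; exact ⟨hgdk, Or.inl rfl⟩
      · exact ⟨h3, Or.inr (by omega)⟩
      · exact ⟨h2, Or.inr (by omega)⟩
  -- bad count = 1 + the two neighbour indicators
  have hbad3 : (List.range n).countP
      (fun j => ((j == k) && true) || (((j == k - 1) && (decide (0 < k) && (d.getD j "" == v)))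
              || ((j == k + 1) && (d.getD j "" == v))))
      = 1 + (if 0 < k ∧ d.getD (k-1) "" = v then 1 else 0)
          + (if k + 1 < n ∧ d.getD (k+1) "" = v then 1 else 0) := by
    rw [countP_or_disjoint]
    · rw [countP_or_disjoint]
      · rw [countP_range_point, countP_range_point, countP_range_point]
        have h1 : (k < n ∧ true = true) := ⟨hk, rfl⟩
        have hiff1 : (k - 1 < n ∧ (decide (0 < k) && (d.getD (k-1) "" == v)) = true)
            ↔ (0 < k ∧ d.getD (k-1) "" = v) := by
          simp only [Bool.and_eq_true, decide_eq_true_eq, beq_iff_eq]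
          constructor
          · rintro ⟨_, h2, h3⟩; exact ⟨h2, h3⟩
          · rintro ⟨h2, h3⟩; exact ⟨by omega, h2, h3⟩
        have hiff2 : (k + 1 < n ∧ (d.getD (k+1) "" == v) = true)
            ↔ (k + 1 < n ∧ d.getD (k+1) "" = v) := by
          simp only [beq_iff_eq]
        rw [if_pos h1, if_congr hiff1 rfl rfl, if_congr hiff2 rfl rfl]
        omega
      · intro x hx
        simp only [Bool.and_eq_true, beq_iff_eq, decide_eq_true_eq]
        rintro ⟨⟨h1, h2, h3⟩, h4, h5⟩; omega
    · intro x hx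
      simp only [Bool.or_eq_true, Bool.and_eq_true, beq_iff_eq, decide_eq_true_eq, Bool.and_true]
      rintro ⟨h1, (⟨h2, h3, h4⟩ | ⟨h2, h3⟩)⟩ <;> omega
  have hcount := count_eq_countP_range d v ""
  rw [← hgood, ← hn] at *
  rw [hbadeq, hbad3] at hsplit
  rw [hcount, hsplit]
  split_ifs <;> push_cast <;> omega


theorem ports_eq (d : List String) :
    (PySem.List.enumerate d 0).foldl (fun acc ic =>
      (PySem.List.enumerate d 0).foldl (fun acc2 jc =>
        if ic.1 = jc.1 then acc2
        else if ic.2 = jc.2 ∧ (ic.1 - jc.1).natAbs ≠ 1 then acc2 ++ [jc.2]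
        else acc2) acc) []
    = (let freq : PySem.Dict String Int :=
         d.foldl (fun dd p => dd.insert p (dd.getD p 0 + 1)) PySem.Dict.empty
       (PySem.List.enumerate d 0).foldl (fun acc iv =>
        let i := iv.1
        let v := iv.2
        let c := freq.getD v 0 - 1
        let c := if 0 < i ∧ PySem.List.pyGet? d (i-1) = some v then c - 1 else c
        let c := if i + 1 < (d.length : Int) ∧ PySem.List.pyGet? d (i+1) = some v then c - 1 else c
        (PySem.List.pyRange 0 c 1).foldl (fun a _ => a ++ [v]) acc) []) := by
  -- A side to flatMap-of-replicate
  have hinner : ∀ (ic : Int × String) (acc : List String),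
      (PySem.List.enumerate d 0).foldl (fun acc2 jc =>
        if ic.1 = jc.1 then acc2
        else if ic.2 = jc.2 ∧ (ic.1 - jc.1).natAbs ≠ 1 then acc2 ++ [jc.2]
        else acc2) acc
      = acc ++ List.replicate ((PySem.List.enumerate d 0).countP
          (fun jc => decide (¬ ic.1 = jc.1 ∧ ic.2 = jc.2 ∧ (ic.1 - jc.1).natAbs ≠ 1))) ic.2 := by
    intro ic acc
    have hb : (fun (acc2 : List String) (jc : Int × String) =>
        if ic.1 = jc.1 then acc2
        else if ic.2 = jc.2 ∧ (ic.1 - jc.1).natAbs ≠ 1 then acc2 ++ [jc.2]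
        else acc2)
        = (fun acc2 jc =>
            if (¬ ic.1 = jc.1 ∧ ic.2 = jc.2 ∧ (ic.1 - jc.1).natAbs ≠ 1) then acc2 ++ [jc.2]
            else acc2) := by
      funext acc2 jc; split_ifs <;> tauto
    rw [hb, PySem.List.foldl_append_ite]
    congr 1
    rw [List.map_congr_left (g := fun _ => ic.2) (by
      intro a ha
      have := List.of_mem_filter ha
      simp only [decide_eq_true_eq] at this
      exact this.2.1.symm), List.map_const', ← List.countP_eq_length_filter]
  have hA : (PySem.List.enumerate d 0).foldl (fun acc ic =>
      (PySem.List.enumerate d 0).foldl (fun acc2 jc =>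
        if ic.1 = jc.1 then acc2
        else if ic.2 = jc.2 ∧ (ic.1 - jc.1).natAbs ≠ 1 then acc2 ++ [jc.2]
        else acc2) acc) []
      = (PySem.List.enumerate d 0).flatMap (fun ic => List.replicate
          ((PySem.List.enumerate d 0).countP
            (fun jc => decide (¬ ic.1 = jc.1 ∧ ic.2 = jc.2 ∧ (ic.1 - jc.1).natAbs ≠ 1))) ic.2) := by
    rw [show (fun (acc : List String) (ic : Int × String) =>
        (PySem.List.enumerate d 0).foldl (fun acc2 jc =>
          if ic.1 = jc.1 then acc2
          else if ic.2 = jc.2 ∧ (ic.1 - jc.1).natAbs ≠ 1 then acc2 ++ [jc.2]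
          else acc2) acc)
        = (fun acc ic => acc ++ List.replicate ((PySem.List.enumerate d 0).countP
            (fun jc => decide (¬ ic.1 = jc.1 ∧ ic.2 = jc.2 ∧ (ic.1 - jc.1).natAbs ≠ 1))) ic.2)
      from funext fun acc => funext fun ic => hinner ic acc]
    rw [PySem.List.foldl_append_eq_flatMap, List.nil_append]
  rw [hA]
  -- B side to flatMap-of-replicate
  simp only [PySem.Dict.foldl_insert_getD_add_one_eq_counter]
  have hbody : (fun (acc : List String) (iv : Int × String) =>
      (PySem.List.pyRange 0
        (if iv.1 + 1 < (d.length : Int) ∧ PySem.List.pyGet? d (iv.1+1) = some iv.2 then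
          (if 0 < iv.1 ∧ PySem.List.pyGet? d (iv.1-1) = some iv.2 then
            (PySem.Dict.counter d).getD iv.2 0 - 1 - 1 else (PySem.Dict.counter d).getD iv.2 0 - 1) - 1
         else
          (if 0 < iv.1 ∧ PySem.List.pyGet? d (iv.1-1) = some iv.2 then
            (PySem.Dict.counter d).getD iv.2 0 - 1 - 1 else (PySem.Dict.counter d).getD iv.2 0 - 1)) 1).foldl
        (fun a _ => a ++ [iv.2]) acc)
      = (fun acc iv => acc ++ List.replicate
          ((if iv.1 + 1 < (d.length : Int) ∧ PySem.List.pyGet? d (iv.1+1) = some iv.2 then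
            (if 0 < iv.1 ∧ PySem.List.pyGet? d (iv.1-1) = some iv.2 then
              (d.count iv.2 : Int) - 1 - 1 else (d.count iv.2 : Int) - 1) - 1
           else
            (if 0 < iv.1 ∧ PySem.List.pyGet? d (iv.1-1) = some iv.2 then
              (d.count iv.2 : Int) - 1 - 1 else (d.count iv.2 : Int) - 1))).toNat iv.2) := by
    funext acc iv
    simp only [PySem.Dict.getD_counter]
    simp [List.map_const']
  show _ = (PySem.List.enumerate d 0).foldl _ []
  rw [hbody, PySem.List.foldl_append_eq_flatMap, List.nil_append]
  -- pointwise equality of the two flatMaps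
  rw [List.flatMap, List.flatMap]
  congr 1
  apply List.map_congr_left
  intro iv hiv
  rw [PySem.List.mem_enumerate_iff] at hiv
  obtain ⟨k, hk, hivk⟩ := hiv
  subst hivk
  simp only [zero_add]
  congr 1
  -- enumerate count → range count
  rw [PySem.List.enumerate_eq_map_pyRange d "", List.countP_map]
  rw [PySem.List.len_eq, PySem.List.pyRange_zero_natCast, List.countP_map]
  have hpred : (List.range d.length).countP
      (fun (j : Nat) => decide (¬ ((k:Int)) = ((j:Int), PySem.List.pyGetD d (j:Int) "").1 ∧
        d[k] = ((j:Int), PySem.List.pyGetD d (j:Int) "").2 ∧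
        (((k:Int)) - ((j:Int), PySem.List.pyGetD d (j:Int) "").1).natAbs ≠ 1))
      = (List.range d.length).countP
      (fun (j : Nat) => !((k : Int) == (j : Int)) && (d[k] == d.getD j "") &&
        !(((k : Int) - (j : Int)).natAbs == 1)) := by
    apply List.countP_congr
    intro j hj
    simp only [decide_eq_true_eq, Bool.and_eq_true, Bool.not_eq_true', beq_eq_false_iff_ne,
      ne_eq, beq_iff_eq, PySem.List.pyGetD_natCast]
    constructor
    · rintro ⟨h1, h2, h3⟩; exact ⟨⟨h1, h2⟩, h3⟩
    · rintro ⟨⟨h1, h2⟩, h3⟩; exact ⟨h1, h2, h3⟩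
  have hcore := core_count d k hk
  have hg1 : (0 < ((k:Nat):Int) ∧ PySem.List.pyGet? d (((k:Nat):Int)-1) = some d[k]) ↔
      (0 < k ∧ d.getD (k-1) "" = d[k]) := by
    constructor
    · rintro ⟨h1, h2⟩
      have hk0 : 0 < k := by exact_mod_cast h1
      have he : (k:Int) - 1 = ((k-1:Nat):Int) := by omega
      rw [he, PySem.List.pyGet?_natCast] at h2
      have hlt : k - 1 < d.length := by omega
      rw [List.getElem?_eq_getElem hlt] at h2
      exact ⟨hk0, by rw [List.getD_eq_getElem _ _ hlt]; exact Option.some.inj h2⟩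
    · rintro ⟨h1, h2⟩
      have he : (k:Int) - 1 = ((k-1:Nat):Int) := by omega
      have hlt : k - 1 < d.length := by omega
      refine ⟨by exact_mod_cast h1, ?_⟩
      rw [he, PySem.List.pyGet?_natCast, List.getElem?_eq_getElem hlt]
      rw [List.getD_eq_getElem _ _ hlt] at h2
      rw [h2]
  have hg2 : (((k:Nat):Int) + 1 < (d.length : Int) ∧ PySem.List.pyGet? d (((k:Nat):Int)+1) = some d[k]) ↔
      (k + 1 < d.length ∧ d.getD (k+1) "" = d[k]) := by
    have he : (k:Int) + 1 = ((k+1:Nat):Int) := by omega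
    constructor
    · rintro ⟨h1, h2⟩
      have hlt : k + 1 < d.length := by exact_mod_cast h1
      rw [he, PySem.List.pyGet?_natCast, List.getElem?_eq_getElem hlt] at h2
      exact ⟨hlt, by rw [List.getD_eq_getElem _ _ hlt]; exact Option.some.inj h2⟩
    · rintro ⟨h1, h2⟩
      refine ⟨by exact_mod_cast h1, ?_⟩
      rw [he, PySem.List.pyGet?_natCast, List.getElem?_eq_getElem h1]
      rw [List.getD_eq_getElem _ _ h1] at h2
      rw [h2]
  simp only [Function.comp_def]
  rw [hpred]
  simp only [hg1, hg2]
  split_ifs at hcore ⊢ <;> omega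

-- ===== VERDICT (by name: the statement is the Claim_ definition above) =====
theorem checkDouble_spec : Claim_equal_checkDouble := by
  intro line _
  show checkDouble line = checkDouble_alt line
  simp only [checkDouble, checkDouble_alt]
  exact ports_eq _
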